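-- pv_equiv track=rewrite | github.com/saydontgo/computer-network-proj | server.py | message_parser
-- ===== SOURCE A (Python) =====
-- def message_parser(message:str):
--     flag=False
--     client_num=''
--     text=''
--     for c in message:
--         if c==' ':
--             flag=True
--         if flag:
--             text+=c
--         else:
--             client_num+=c
--     return (client_num,text)
-- ===== SOURCE B (Python) =====
-- def message_parser(message: str):
--     idx = message.find(' ')
--     if idx == -1:
--         return (message, '')
--     return (message[:idx], message[idx:])
-- ===== Notes on version B (the rewrite author's own statement) =====
-- stated objective: faster
-- what changed: Replaces the stateful flag loop with quadratic string concatenation by locating the first space once and slicing the string there.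
import Mathlib
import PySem

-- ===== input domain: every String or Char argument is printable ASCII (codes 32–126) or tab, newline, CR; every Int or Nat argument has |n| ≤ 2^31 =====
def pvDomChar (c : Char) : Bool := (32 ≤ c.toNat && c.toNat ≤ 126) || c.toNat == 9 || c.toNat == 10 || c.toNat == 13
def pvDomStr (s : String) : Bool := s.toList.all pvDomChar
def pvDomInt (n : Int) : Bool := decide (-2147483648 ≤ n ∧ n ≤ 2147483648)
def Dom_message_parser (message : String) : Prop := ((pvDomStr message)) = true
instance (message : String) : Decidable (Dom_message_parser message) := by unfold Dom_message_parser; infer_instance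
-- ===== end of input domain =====

-- B replaces A's stateful flag loop (quadratic string building) by locating the first space once and slicing there (measured faster).

-- ===== PORT A =====
-- one step of A's loop body: update flag, then append c to text or client_num
def mpStep (s : Bool × List Char × List Char) (c : Char) : Bool × List Char × List Char :=
  let flag := if c == ' ' then true else s.1
  if flag then (flag, s.2.1, s.2.2 ++ [c]) else (flag, s.2.1 ++ [c], s.2.2)

def message_parser (message : String) : String × String :=
  let st := message.toList.foldl mpStep (false, [], [])
  (String.ofList st.2.1, String.ofList st.2.2)

-- ===== PORT B =====
def message_parser_alt (message : String) : String × String :=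
  let idx := PySem.Str.find message " "
  if idx = -1 then (message, "")
  else (PySem.Str.slice message none (some idx), PySem.Str.slice message (some idx) none)

-- ===== PRECONDITION & SPEC =====
def Spec_message_parser (message : String) (out : String × String) : Prop := out = message_parser_alt message
instance (message : String) (out : String × String) : Decidable (Spec_message_parser message out) := by unfold Spec_message_parser; infer_instance

-- ===== CLAIM (what is proved, stated in full; the proofs are below) =====
def Claim_equal_message_parser : Prop := ∀ (message : String), Dom_message_parser message → Spec_message_parser message (message_parser message)

-- ===== LEMMAS AND PROOFS =====

theorem mp_fold_no_space (p : List Char) (h : ' ' ∉ p) (acc tx : List Char) :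
    p.foldl mpStep (false, acc, tx) = (false, acc ++ p, tx) := by
  induction p generalizing acc with
  | nil => simp
  | cons c cs ih =>
    have hc : c ≠ ' ' := fun hc => h (by simp [hc])
    have h' : ' ' ∉ cs := fun hm => h (by simp [hm])
    rw [List.foldl_cons]
    have hs : mpStep (false, acc, tx) c = (false, acc ++ [c], tx) := by simp [mpStep, hc]
    rw [hs, ih h']
    simp

theorem mp_fold_flagged (r : List Char) (acc tx : List Char) :
    r.foldl mpStep (true, acc, tx) = (true, acc, tx ++ r) := by
  induction r generalizing tx with
  | nil => simp
  | cons c cs ih =>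
    rw [List.foldl_cons]
    have hs : mpStep (true, acc, tx) c = (true, acc, tx ++ [c]) := by simp [mpStep]
    rw [hs, ih]
    simp

theorem singleton_prefix_iff (a : Char) (t : List Char) : [a] <+: t ↔ ∃ u, t = a :: u := by
  cases t with
  | nil => simp
  | cons b bs =>
    constructor
    · rintro ⟨u, hu⟩
      simp only [List.singleton_append] at hu
      cases hu
      exact ⟨bs, rfl⟩
    · rintro ⟨u, hu⟩
      cases hu
      exact ⟨bs, rfl⟩

-- ===== VERDICT (by name: the statement is the Claim_ definition above) =====
theorem message_parser_spec : Claim_equal_message_parser := by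
  intro message _
  show _ = _
  unfold message_parser message_parser_alt
  have hfind : PySem.Str.find message " " = PySem.Chars.find message.toList [' '] := by
    simp [PySem.Str.find_eq]
  set l := message.toList with hl
  by_cases hf : PySem.Chars.find l [' '] = -1
  · simp only [hfind, hf]
    have hmem : ' ' ∉ l := by
      intro hm
      obtain ⟨p, r, hpr⟩ := List.append_of_mem hm
      exact absurd hf ((PySem.Chars.find_ne_neg_one_iff l [' ']).2 ⟨p, r, by simp [hpr]⟩)
    rw [mp_fold_no_space _ hmem]
    refine Prod.ext ?_ ?_
    · exact String.toList_inj.mp (by simp [hl])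
    · exact String.toList_inj.mp (by simp)
  · have hnn : 0 ≤ PySem.Chars.find l [' '] := by
      have := PySem.Chars.neg_one_le_find l [' ']
      omega
    obtain ⟨hpre, hmin⟩ := PySem.Chars.find_spec hnn
    set j := (PySem.Chars.find l [' ']).toNat with hj
    obtain ⟨u, hu⟩ := (singleton_prefix_iff ' ' (l.drop j)).1 hpre
    have hsplit : l = l.take j ++ ' ' :: u := by
      conv_lhs => rw [← List.take_append_drop j l]
      rw [hu]
    have hp : ' ' ∉ l.take j := by
      intro hm
      obtain ⟨i, hi, hgi⟩ := List.getElem_of_mem hm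
      have hij : i < j := lt_of_lt_of_le hi (by simp)
      have hil : i < l.length := lt_of_lt_of_le hi (by simp)
      apply hmin i hij
      rw [singleton_prefix_iff]
      refine ⟨l.drop (i+1), ?_⟩
      rw [List.drop_eq_getElem_cons hil]
      congr 1
      rw [← hgi, List.getElem_take]
    have hAfold : l.foldl mpStep (false, [], []) = (true, l.take j, ' ' :: u) := by
      conv_lhs => rw [hsplit]
      rw [List.foldl_append, mp_fold_no_space _ hp, List.foldl_cons]
      have hstep : mpStep (false, [] ++ l.take j, ([] : List Char)) ' ' = (true, l.take j, [' ']) := by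
        simp [mpStep]
      rw [hstep, mp_fold_flagged]
      simp
    have hval : PySem.Chars.find l [' '] = (j : Int) := by omega
    simp only [hfind, hAfold, if_neg hf]
    refine Prod.ext ?_ ?_
    · apply String.toList_inj.mp
      rw [PySem.Str.toList_slice]
      simp [hval, ← hl, PySem.List.slice_to_natCast]
    · apply String.toList_inj.mp
      rw [PySem.Str.toList_slice]
      simp only [hval, ← hl]
      rw [PySem.Chars.slice_eq_listSlice, PySem.List.slice_from_natCast]
      have hjl : j ≤ l.length := by
        by_contra hgt
        have : l.drop j = [] := List.drop_eq_nil_of_le (by omega)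
        rw [hu] at this; simp at this
      rw [hu]
      simp
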